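-- pv_equiv track=rewrite | github.com/roshanprabhakar/Stocks | main.py | format_quotes
-- ===== SOURCE A (Python) =====
-- numbers = "1234567890"
--
-- def format_quotes(data):
--     data += " "
--     out = ""
--     for i in range(len(data) - 1):
--         if data[i + 1] in numbers and data[i] not in numbers:  # will never be negative (stock values)
--             out += data[i] + "'"
--         elif data[i + 1] not in numbers and data[i] in numbers:
--             out += data[i] + "'"
--         else:
--             out += data[i]
--     return out
-- ===== SOURCE B (Python) =====
-- numbers = "1234567890"
--
-- def format_quotes(data):
--     # Group the input into maximal runs of digits / non-digits, then join the
--     # runs with quotes (a trailing empty part adds the quote after a final digit run).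
--     parts = []
--     run = ""
--     for c in data:
--         if run and (c in numbers) != (run[0] in numbers):
--             parts.append(run)
--             run = ""
--         run += c
--     if run:
--         parts.append(run)
--     if parts and parts[-1][0] in numbers:
--         parts.append("")
--     return "'".join(parts)
-- ===== Notes on version B (the rewrite author's own statement) =====
-- stated objective: idiomatic
-- what changed: A scans character-by-character with an appended sentinel space and index lookahead; B instead groups the string into maximal digit/non-digit runs with a run accumulator and joins the runs with quotes (a trailing empty part supplies the quote after a final digit run).
import Mathlib
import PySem

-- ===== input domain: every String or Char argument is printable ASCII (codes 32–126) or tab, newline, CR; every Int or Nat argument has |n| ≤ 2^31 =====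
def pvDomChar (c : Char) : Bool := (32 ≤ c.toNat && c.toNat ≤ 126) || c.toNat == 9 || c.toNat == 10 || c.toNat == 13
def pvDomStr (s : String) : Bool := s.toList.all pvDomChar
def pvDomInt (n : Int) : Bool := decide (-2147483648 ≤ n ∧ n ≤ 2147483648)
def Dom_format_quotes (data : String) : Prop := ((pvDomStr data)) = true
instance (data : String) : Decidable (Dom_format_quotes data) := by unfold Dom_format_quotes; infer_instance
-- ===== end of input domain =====

-- B replaces A's indexed scan (with an appended sentinel space) by grouping the string
-- into maximal digit/non-digit runs and joining the runs with quotes (objective: idiomatic).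

-- numbers = "1234567890" (module constant, as a char list)
def pvNumbers : List Char := ['1', '2', '3', '4', '5', '6', '7', '8', '9', '0']

-- `c in numbers` for a single character (Python substring test on a 1-char string)
def pvInNumbers (c : Char) : Bool := PySem.Chars.isIn [c] pvNumbers

-- ===== PORT A =====
-- the body of A's for-loop: out += data[i] (+ "'" at a digit/non-digit boundary)
def pvStepA (d : List Char) (out : List Char) (i : Int) : List Char :=
  let ci1 := PySem.List.pyGetD d (i + 1) ' '
  let ci := PySem.List.pyGetD d i ' '
  if pvInNumbers ci1 && !pvInNumbers ci then out ++ [ci, '\'']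
  else if !pvInNumbers ci1 && pvInNumbers ci then out ++ [ci, '\'']
  else out ++ [ci]

-- literal port of A: data += " "; out = ""; for i in range(len(data) - 1): <pvStepA>
def format_quotes (data : String) : String :=
  let d : List Char := data.toList ++ [' ']
  String.ofList ((PySem.List.pyRange 0 ((d.length : Int) - 1) 1).foldl (pvStepA d) [])

-- ===== PORT B =====
-- the body of Source B's for-loop on the state (parts, run)
def pvStepB (st : List (List Char) × List Char) (c : Char) : List (List Char) × List Char :=
  let parts := st.1
  let run := st.2
  if !run.isEmpty && (pvInNumbers c != pvInNumbers (PySem.List.pyGetD run 0 ' ')) then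
    (parts ++ [run], [c])        -- parts.append(run); run = ""; run += c
  else (parts, run ++ [c])       -- run += c

-- Source B's line: if parts and parts[-1][0] in numbers: parts.append("")
def pvCap (parts : List (List Char)) : List (List Char) :=
  if !parts.isEmpty && pvInNumbers (PySem.List.pyGetD (PySem.List.pyGetD parts (-1) []) 0 ' ')
  then parts ++ [[]] else parts

-- Source B's lines after the loop: if run: parts.append(run); <pvCap>; return "'".join(parts)
def pvFinish (st : List (List Char) × List Char) : List Char :=
  PySem.Chars.join ['\''] (pvCap (if !st.2.isEmpty then st.1 ++ [st.2] else st.1))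

-- literal port of Source B: parts = []; run = ""; for c in data: <pvStepB>; <pvFinish>
def format_quotes_alt (data : String) : String :=
  String.ofList (pvFinish (data.toList.foldl pvStepB ([], [])))

-- ===== PRECONDITION & SPEC =====
def Spec_format_quotes (data : String) (out : String) : Prop := out = format_quotes_alt data
instance (data : String) (out : String) : Decidable (Spec_format_quotes data out) := by unfold Spec_format_quotes; infer_instance

-- ===== CLAIM (what is proved, stated in full; the proofs are below) =====
def Claim_equal_format_quotes : Prop := ∀ (data : String), Dom_format_quotes data → Spec_format_quotes data (format_quotes data)

-- ===== LEMMAS AND PROOFS =====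

-- reference: the output for the rest of the string, given the digit-class b of the current run
def pvTail (l : List Char) (b : Bool) : List Char :=
  match l with
  | [] => if b then ['\''] else []
  | c :: l' => if pvInNumbers c = b then c :: pvTail l' b else '\'' :: c :: pvTail l' (pvInNumbers c)

-- reference output for the whole string
def pvRef (l : List Char) : List Char :=
  match l with
  | [] => []
  | c :: l' => c :: pvTail l' (pvInNumbers c)

-- digit-class of the next character (the sentinel space is non-digit)
def pvNextDig (l : List Char) : Bool :=
  match l with
  | [] => false
  | c :: _ => pvInNumbers c

-- A's output, written structurally over the original string
def pvASpec (l : List Char) : List Char :=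
  match l with
  | [] => []
  | c :: rest => (if pvInNumbers c ≠ pvNextDig rest then [c, '\''] else [c]) ++ pvASpec rest

theorem pvTail_eq_aspec (l : List Char) (b : Bool) :
    (if b ≠ pvNextDig l then ['\''] else []) ++ pvASpec l = pvTail l b := by
  induction l generalizing b with
  | nil => cases b <;> simp [pvASpec, pvNextDig, pvTail]
  | cons c l' ih =>
    rw [show pvASpec (c :: l') = (if pvInNumbers c ≠ pvNextDig l' then [c, '\''] else [c]) ++ pvASpec l' from rfl]
    rw [show pvTail (c :: l') b
        = if pvInNumbers c = b then c :: pvTail l' b else '\'' :: c :: pvTail l' (pvInNumbers c) from rfl]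
    by_cases h : pvInNumbers c = b
    · subst h
      rw [if_pos rfl, ← ih (pvInNumbers c)]
      rw [show (if pvInNumbers c ≠ pvNextDig (c :: l') then ['\''] else []) = [] from by
        simp [pvNextDig]]
      by_cases hin : pvInNumbers c = pvNextDig l' <;> simp [hin]
    · rw [if_neg h, ← ih (pvInNumbers c)]
      rw [show (if b ≠ pvNextDig (c :: l') then ['\''] else []) = ['\''] from by
        rw [if_pos]; intro hb; exact h hb.symm]
      by_cases hin : pvInNumbers c = pvNextDig l' <;> simp [hin]

theorem pvASpec_eq_ref (l : List Char) : pvASpec l = pvRef l := by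
  cases l with
  | nil => rfl
  | cons c l' =>
    rw [show pvASpec (c :: l') = (if pvInNumbers c ≠ pvNextDig l' then [c, '\''] else [c]) ++ pvASpec l' from rfl]
    rw [show pvRef (c :: l') = c :: pvTail l' (pvInNumbers c) from rfl]
    rw [← pvTail_eq_aspec l' (pvInNumbers c)]
    by_cases hin : pvInNumbers c = pvNextDig l' <;> simp [hin]

theorem pvA_loop (l : List Char) : ∀ (d : List Char) (k : Nat) (acc : List Char),
    d.drop k = l ++ [' '] →
    (PySem.List.pyRange (k : Int) ((k : Int) + l.length) 1).foldl (pvStepA d) acc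
      = acc ++ pvASpec l := by
  induction l with
  | nil =>
    intro d k acc _
    rw [PySem.List.pyRange_one_eq_nil (by simp)]
    simp [pvASpec]
  | cons c l' ih =>
    intro d k acc hd
    have hget : d[k]? = some c := by
      have h : (List.drop k d)[0]? = d[k + 0]? := List.getElem?_drop
      simp [hd] at h
      simpa using h.symm
    have hget1 : d[k + 1]? = some ((l' ++ [' ']).headD ' ') := by
      have h : (List.drop k d)[1]? = d[k + 1]? := List.getElem?_drop
      rw [hd] at h
      cases l' with
      | nil => simpa using h.symm
      | cons e l'' => simpa using h.symm
    have hdrop1 : d.drop (k + 1) = l' ++ [' '] := by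
      have h : d.drop (k + 1) = (d.drop k).drop 1 := by rw [List.drop_drop]
      simp [h, hd]
    rw [PySem.List.pyRange_one_cons (by push_cast [List.length_cons]; omega)]
    rw [List.foldl_cons]
    have hstep : pvStepA d acc (k : Int)
        = acc ++ (if pvInNumbers c ≠ pvNextDig l' then [c, '\''] else [c]) := by
      have e0 : PySem.List.pyGetD d (k : Int) ' ' = c := by
        simp [PySem.List.pyGetD_natCast, List.getD, hget]
      have e1 : PySem.List.pyGetD d ((k : Int) + 1) ' ' = (l' ++ [' ']).headD ' ' := by
        rw [show (k : Int) + 1 = ((k + 1 : Nat) : Int) from by push_cast; ring]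
        rw [PySem.List.pyGetD_natCast]
        simp [List.getD, hget1]
      have hnext : pvInNumbers ((l' ++ [' ']).headD ' ') = pvNextDig l' := by
        cases l' with
        | nil => decide
        | cons e l'' => simp [pvNextDig]
      simp only [pvStepA, e0, e1, hnext]
      cases hb : pvInNumbers c <;> cases hn : pvNextDig l' <;> simp
    rw [hstep]
    rw [show (k : Int) + 1 = ((k + 1 : Nat) : Int) from by push_cast; ring]
    rw [show (k : Int) + ((c :: l').length : Int) = ((k + 1 : Nat) : Int) + (l'.length : Int) from by
      push_cast [List.length_cons]; omega]
    rw [ih d (k + 1) (acc ++ (if pvInNumbers c ≠ pvNextDig l' then [c, '\''] else [c])) hdrop1]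
    rw [show pvASpec (c :: l') = (if pvInNumbers c ≠ pvNextDig l' then [c, '\''] else [c]) ++ pvASpec l' from rfl]
    simp [List.append_assoc]

theorem pvA_eq (data : String) : format_quotes data = String.ofList (pvRef data.toList) := by
  rw [show format_quotes data
      = String.ofList ((PySem.List.pyRange 0 ((((data.toList ++ [' ']).length : Int)) - 1) 1).foldl
          (pvStepA (data.toList ++ [' '])) []) from rfl]
  rw [show (((data.toList ++ [' ']).length : Int)) - 1 = ((0 : Nat) : Int) + (data.toList.length : Int) from by
    push_cast [List.length_append, List.length_cons, List.length_nil]; omega]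
  rw [show ((0 : Nat) : Int) = (0 : Int) from rfl]
  have h := pvA_loop data.toList (data.toList ++ [' ']) 0 [] (by simp)
  simp only [Nat.cast_zero] at h
  rw [h, pvASpec_eq_ref]
  simp

-- "each completed part followed by a quote"
def pvJ (parts : List (List Char)) : List Char :=
  if parts.isEmpty then [] else PySem.Chars.join ['\''] parts ++ ['\'']

theorem pvJoin_eq_pvJ_add_last (parts : List (List Char)) (p : List Char) :
    PySem.Chars.join ['\''] (parts ++ [p]) = pvJ parts ++ p := by
  induction parts with
  | nil => simp [pvJ, PySem.Chars.join_singleton]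
  | cons q rest ih =>
    cases rest with
    | nil =>
      rw [show ([q] ++ [p]) = q :: [p] from rfl, PySem.Chars.join_cons_cons]
      simp [pvJ, PySem.Chars.join_singleton]
    | cons r rest' =>
      rw [show ((q :: r :: rest') ++ [p]) = q :: ((r :: rest') ++ [p]) from rfl]
      rw [show (q :: ((r :: rest') ++ [p])) = q :: (r :: (rest' ++ [p])) from rfl]
      rw [PySem.Chars.join_cons_cons]
      rw [show (r :: (rest' ++ [p])) = (r :: rest') ++ [p] from rfl, ih]
      simp only [pvJ, List.isEmpty_cons, Bool.false_eq_true, if_false]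
      simp [PySem.Chars.join_cons_cons]

theorem pvJ_append (parts : List (List Char)) (p : List Char) :
    pvJ (parts ++ [p]) = pvJ parts ++ p ++ ['\''] := by
  rw [show pvJ (parts ++ [p]) = PySem.Chars.join ['\''] (parts ++ [p]) ++ ['\''] from by simp [pvJ]]
  rw [pvJoin_eq_pvJ_add_last]

theorem pvB_loop (l : List Char) :
    ∀ (parts : List (List Char)) (c0 : Char) (run' : List Char),
      pvFinish (l.foldl pvStepB (parts, c0 :: run'))
        = pvJ parts ++ (c0 :: run') ++ pvTail l (pvInNumbers c0) := by
  induction l with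
  | nil =>
    intro parts c0 run'
    rw [List.foldl_nil]
    rw [show pvFinish (parts, c0 :: run')
        = PySem.Chars.join ['\''] (pvCap (parts ++ [c0 :: run'])) from by simp [pvFinish]]
    rw [show pvCap (parts ++ [c0 :: run'])
        = (if pvInNumbers c0 then (parts ++ [c0 :: run']) ++ [[]] else parts ++ [c0 :: run']) from by
      simp only [pvCap, PySem.List.pyGetD_neg_one_append_singleton parts (c0 :: run') [],
        PySem.List.pyGetD_zero_cons c0 run' ' ']
      rw [show (!(parts ++ [c0 :: run']).isEmpty && pvInNumbers c0) = pvInNumbers c0 from by simp]]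
    cases hb : pvInNumbers c0 with
    | true =>
      rw [if_pos rfl, pvJoin_eq_pvJ_add_last (parts ++ [c0 :: run']) [], pvJ_append]
      simp [pvTail]
    | false =>
      rw [if_neg (by simp), pvJoin_eq_pvJ_add_last]
      simp [pvTail]
  | cons c l' ih =>
    intro parts c0 run'
    rw [List.foldl_cons]
    by_cases hc : pvInNumbers c = pvInNumbers c0
    · rw [show pvStepB (parts, c0 :: run') c = (parts, (c0 :: run') ++ [c]) from by
        simp [pvStepB, PySem.List.pyGetD_zero_cons c0 run' ' ', hc]]
      rw [show (c0 :: run') ++ [c] = c0 :: (run' ++ [c]) from rfl]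
      rw [ih parts c0 (run' ++ [c])]
      simp [pvTail, hc, List.append_assoc]
    · rw [show pvStepB (parts, c0 :: run') c = (parts ++ [c0 :: run'], [c]) from by
        simp only [pvStepB, List.isEmpty_cons, Bool.not_false, Bool.true_and,
          PySem.List.pyGetD_zero_cons c0 run' ' ']
        rw [if_pos (by simp [bne_iff_ne, hc])]]
      rw [ih (parts ++ [c0 :: run']) c []]
      rw [pvJ_append]
      simp [pvTail, hc, List.append_assoc]

theorem pvB_eq (data : String) : format_quotes_alt data = String.ofList (pvRef data.toList) := by
  rw [show format_quotes_alt data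
      = String.ofList (pvFinish (data.toList.foldl pvStepB ([], []))) from rfl]
  cases hl : data.toList with
  | nil =>
    rw [List.foldl_nil]
    rw [show pvFinish (([] : List (List Char)), ([] : List Char))
        = PySem.Chars.join ['\''] (pvCap []) from by simp [pvFinish]]
    simp [pvCap, PySem.Chars.join_nil, pvRef]
  | cons c l' =>
    rw [List.foldl_cons]
    rw [show pvStepB (([] : List (List Char)), ([] : List Char)) c = ([], [c]) from by
      simp [pvStepB]]
    rw [pvB_loop l' [] c []]
    rw [show pvRef (c :: l') = c :: pvTail l' (pvInNumbers c) from rfl]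
    simp [pvJ]

-- ===== VERDICT (by name: the statement is the Claim_ definition above) =====
theorem format_quotes_spec : Claim_equal_format_quotes := by
  intro data _
  unfold Spec_format_quotes
  rw [pvA_eq, pvB_eq]
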